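-- pv_equiv track=rewrite | github.com/wjk-g/sejm_search | sejm_search/data_collection/process_transcript.py | fits_speaker_pattern
-- ===== SOURCE A (Python) =====
-- from string import ascii_letters
--
-- def fits_speaker_pattern(text_chunk: str) -> bool:
--     # Conditions
--     starts_with_b_tag = text_chunk.startswith("<b>")
--     starts_with_dash = text_chunk.startswith("<b>–")
--     starts_with_short_dash = text_chunk.startswith("<b>-")
--     starts_with_num_plus_parenthesis = any(text_chunk.startswith(f"<b>{i})") for i in range(1, 100))
--     # 4th char is a letter and 5th symbol is ")"
--     starts_with_letter_plus_parenthesis = len(text_chunk) > 4 and text_chunk[3] in ascii_letters and text_chunk[4] == ')'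
--
--     if not starts_with_b_tag:
--         return False
--
--     meets_all_conditions = (
--         not starts_with_dash
--         and not starts_with_short_dash
--         and not starts_with_num_plus_parenthesis
--         and not starts_with_letter_plus_parenthesis
--     )
--
--     return meets_all_conditions
-- ===== SOURCE B (Python) =====
-- from string import ascii_letters
--
-- def fits_speaker_pattern(text_chunk: str) -> bool:
--     # Classify the (at most) three characters after the bold tag by character ranges,
--     # instead of enumerating 99 numeric prefixes.
--     if not text_chunk.startswith("<b>"):
--         return False
--     head = text_chunk[3:6]
--     if head.startswith(("–", "-")):
--         return False
--     if len(head) >= 2 and head[1] == ")" and (head[0] in ascii_letters or "1" <= head[0] <= "9"):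
--         return False
--     if len(head) == 3 and head[2] == ")" and "1" <= head[0] <= "9" and "0" <= head[1] <= "9":
--         return False
--     return True
-- ===== Notes on version B (the rewrite author's own statement) =====
-- stated objective: alternative
-- what changed: Replaces the any() over 99 enumerated numeric prefixes and the five separate flag computations by a single classification of the three characters following the bold tag using character-range tests.
import Mathlib
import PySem

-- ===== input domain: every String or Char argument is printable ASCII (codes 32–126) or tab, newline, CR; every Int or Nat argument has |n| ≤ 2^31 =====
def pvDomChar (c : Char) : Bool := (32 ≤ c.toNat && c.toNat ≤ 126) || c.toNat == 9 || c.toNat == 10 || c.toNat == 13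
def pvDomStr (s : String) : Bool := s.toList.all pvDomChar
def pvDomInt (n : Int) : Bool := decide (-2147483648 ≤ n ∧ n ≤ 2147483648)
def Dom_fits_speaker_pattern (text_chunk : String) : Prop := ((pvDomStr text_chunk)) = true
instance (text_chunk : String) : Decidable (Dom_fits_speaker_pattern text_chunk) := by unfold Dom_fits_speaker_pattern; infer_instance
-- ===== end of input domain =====

-- B replaces A's any() over 99 enumerated numeric prefixes and its five separate flags by a
-- single character-range classification of the three characters after the bold tag (objective: alternative).

-- ===== PORT A =====
-- string.ascii_letters, as a list of characters
def pvAsciiLetters : List Char :=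
  ['a','b','c','d','e','f','g','h','i','j','k','l','m','n','o','p','q','r','s','t','u','v','w','x','y','z',
   'A','B','C','D','E','F','G','H','I','J','K','L','M','N','O','P','Q','R','S','T','U','V','W','X','Y','Z']

def fits_speaker_pattern (text_chunk : String) : Bool :=
  let starts_with_b_tag := PySem.Str.startswith text_chunk "<b>"
  let starts_with_dash := PySem.Str.startswith text_chunk "<b>–"
  let starts_with_short_dash := PySem.Str.startswith text_chunk "<b>-"
  -- any(text_chunk.startswith(f"<b>{i})") for i in range(1, 100)); f"<b>{i})" built at char level
  let starts_with_num_plus_parenthesis :=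
    (PySem.List.pyRange 1 100 1).any (fun i =>
      PySem.Chars.startswith text_chunk.toList ('<' :: 'b' :: '>' :: (PySem.Int.toChars i ++ [')'])))
  -- len(text_chunk) > 4 and text_chunk[3] in ascii_letters and text_chunk[4] == ')'
  -- (text_chunk[3] is a single character, so 'in ascii_letters' is character membership, exact here)
  let starts_with_letter_plus_parenthesis :=
    decide (4 < PySem.Str.len text_chunk) &&
      ((PySem.Str.pyGet? text_chunk 3).elim false (fun c => pvAsciiLetters.contains c)) &&
      ((PySem.Str.pyGet? text_chunk 4).elim false (fun c => c == ')'))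
  if !starts_with_b_tag then false
  else !starts_with_dash && !starts_with_short_dash &&
       !starts_with_num_plus_parenthesis && !starts_with_letter_plus_parenthesis

-- ===== PORT B =====
def fits_speaker_pattern_alt (text_chunk : String) : Bool :=
  if !PySem.Str.startswith text_chunk "<b>" then false
  else
    -- head = text_chunk[3:6]
    let head := (PySem.Str.slice text_chunk (some 3) (some 6)).toList
    if PySem.Chars.startswith head ['–'] || PySem.Chars.startswith head ['-'] then false
    else if decide (2 ≤ head.length) && (head.getD 1 ' ' == ')') &&
            (pvAsciiLetters.contains (head.getD 0 ' ') ||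
             (decide ('1' ≤ head.getD 0 ' ') && decide (head.getD 0 ' ' ≤ '9'))) then false
    else if decide (head.length = 3) && (head.getD 2 ' ' == ')') &&
            (decide ('1' ≤ head.getD 0 ' ') && decide (head.getD 0 ' ' ≤ '9')) &&
            (decide ('0' ≤ head.getD 1 ' ') && decide (head.getD 1 ' ' ≤ '9')) then false
    else true

-- ===== PRECONDITION & SPEC =====
def Spec_fits_speaker_pattern (text_chunk : String) (out : Bool) : Prop := out = fits_speaker_pattern_alt text_chunk
instance (text_chunk : String) (out : Bool) : Decidable (Spec_fits_speaker_pattern text_chunk out) := by unfold Spec_fits_speaker_pattern; infer_instance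

-- ===== CLAIM (what is proved, stated in full; the proofs are below) =====
def Claim_equal_fits_speaker_pattern : Prop := ∀ (text_chunk : String), Dom_fits_speaker_pattern text_chunk → Spec_fits_speaker_pattern text_chunk (fits_speaker_pattern text_chunk)

-- ===== LEMMAS AND PROOFS =====

-- A's numeric any(), with the common "<b>" already stripped
def pvNumAny (rest : List Char) : Bool :=
  (PySem.List.pyRange 1 100 1).any (fun i =>
    PySem.Chars.startswith rest (PySem.Int.toChars i ++ [')']))

theorem pv_sw_cons (c : Char) (s p : List Char) :
    PySem.Chars.startswith (c::s) (c::p) = PySem.Chars.startswith s p := by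
  simp [PySem.Chars.startswith]

theorem pv_mem_digits19 (a : Char) (h1 : '1' ≤ a) (h2 : a ≤ '9') :
    a ∈ ['1','2','3','4','5','6','7','8','9'] := by
  simp only [Char.le_def, UInt32.le_iff_toNat_le] at h1 h2
  have h1' : 49 ≤ a.toNat := h1
  have h2' : a.toNat ≤ 57 := h2
  have ha : Char.ofNat a.toNat = a := Char.ofNat_toNat a
  have : a.toNat = 49 ∨ a.toNat = 50 ∨ a.toNat = 51 ∨ a.toNat = 52 ∨ a.toNat = 53 ∨
      a.toNat = 54 ∨ a.toNat = 55 ∨ a.toNat = 56 ∨ a.toNat = 57 := by omega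
  rcases this with h|h|h|h|h|h|h|h|h <;> (rw [← ha, h]; decide)

theorem pv_mem_digits09 (a : Char) (h1 : '0' ≤ a) (h2 : a ≤ '9') :
    a ∈ ['0','1','2','3','4','5','6','7','8','9'] := by
  simp only [Char.le_def, UInt32.le_iff_toNat_le] at h1 h2
  have h1' : 48 ≤ a.toNat := h1
  have h2' : a.toNat ≤ 57 := h2
  have ha : Char.ofNat a.toNat = a := Char.ofNat_toNat a
  have : a.toNat = 48 ∨ a.toNat = 49 ∨ a.toNat = 50 ∨ a.toNat = 51 ∨ a.toNat = 52 ∨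
      a.toNat = 53 ∨ a.toNat = 54 ∨ a.toNat = 55 ∨ a.toNat = 56 ∨ a.toNat = 57 := by omega
  rcases this with h|h|h|h|h|h|h|h|h|h <;> (rw [← ha, h]; decide)

theorem pv_numAny_nil : pvNumAny [] = false := by decide

set_option maxRecDepth 8192 in
theorem pv_numAny_one (a : Char) : pvNumAny [a] = false := by
  rw [pvNumAny, List.any_eq_false]
  intro i hi
  have hlen : ∀ j ∈ PySem.List.pyRange 1 100 1, 2 ≤ (PySem.Int.toChars j ++ [')']).length := by
    decide
  intro hsw
  rw [PySem.Chars.startswith_iff] at hsw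
  have h1 := hsw.length_le
  have h2 := hlen i hi
  simp only [List.length_append, List.length_cons, List.length_nil] at h1 h2
  omega

set_option maxRecDepth 32768 in
theorem pv_numAny_cons (a b : Char) (rs : List Char) :
    pvNumAny (a :: b :: rs) =
      ((decide ('1' ≤ a) && decide (a ≤ '9')) &&
        ((b == ')') || ((decide ('0' ≤ b) && decide (b ≤ '9')) && (rs.head? == some ')')))) := by
  rw [Bool.eq_iff_iff]
  rw [pvNumAny, List.any_eq_true]
  constructor
  · rintro ⟨i, hi, hsw⟩
    have hshape : ∀ j ∈ PySem.List.pyRange 1 100 1,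
        ((PySem.Int.toChars j).all (fun c => decide ('0' ≤ c) && decide (c ≤ '9')) = true) ∧
        ('1' ≤ (PySem.Int.toChars j).headD ' ') ∧
        (1 ≤ (PySem.Int.toChars j).length ∧ (PySem.Int.toChars j).length ≤ 2) := by decide
    obtain ⟨hall, hhead, hlen1, hlen2⟩ := hshape i hi
    rw [PySem.Chars.startswith_iff] at hsw
    rcases hp : PySem.Int.toChars i with _ | ⟨d, _ | ⟨e, _ | ⟨f, ps⟩⟩⟩ <;> rw [hp] at hsw hall hhead hlen1 hlen2
    · simp at hlen1
    · obtain ⟨u, hu⟩ := hsw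
      simp only [List.all_cons, List.all_nil, Bool.and_eq_true, decide_eq_true_eq] at hall
      obtain ⟨rfl, rfl, rfl⟩ : d = a ∧ ')' = b ∧ u = rs := by simpa using hu
      simp only [List.headD_cons] at hhead
      simp [hhead, hall.1.2]
    · obtain ⟨u, hu⟩ := hsw
      simp only [List.all_cons, List.all_nil, Bool.and_eq_true, decide_eq_true_eq] at hall
      obtain ⟨rfl, rfl, hrs⟩ : d = a ∧ e = b ∧ ')' :: u = rs := by simpa using hu
      simp only [List.headD_cons] at hhead
      simp [hhead, hall.1.2, hall.2.1.1, hall.2.1.2, ← hrs]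
    · simp at hlen2
  · intro h
    simp only [Bool.and_eq_true, Bool.or_eq_true, decide_eq_true_eq, beq_iff_eq] at h
    obtain ⟨⟨ha1, ha2⟩, hb⟩ := h
    have ha := pv_mem_digits19 a ha1 ha2
    rcases hb with rfl | ⟨⟨hb1, hb2⟩, hh⟩
    · refine ⟨((a.toNat - 48 : Nat) : Int), ?_, ?_⟩
      · fin_cases ha <;> decide
      · rw [PySem.Chars.startswith_iff]
        fin_cases ha <;> exact ⟨rs, rfl⟩
    · have hbm := pv_mem_digits09 b hb1 hb2
      obtain ⟨rs', rfl⟩ : ∃ rs', rs = ')' :: rs' := by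
        cases rs with
        | nil => simp at hh
        | cons x xs => simp at hh; exact ⟨xs, by rw [hh]⟩
      refine ⟨((10 * a.toNat + b.toNat - 528 : Nat) : Int), ?_, ?_⟩
      · fin_cases ha <;> fin_cases hbm <;> decide
      · rw [PySem.Chars.startswith_iff]
        fin_cases ha <;> fin_cases hbm <;> exact ⟨rs', rfl⟩

theorem pv_beq (x y : Char) : (x == y) = decide (x = y) := by
  by_cases h : x = y <;> simp [h]

theorem pv_sw_single (a c : Char) (l : List Char) :
    PySem.Chars.startswith (a::l) [c] = (c == a) := by
  simp [PySem.Chars.startswith, List.isPrefixOf]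

theorem pv_sw_nil (s : List Char) : PySem.Chars.startswith s [] = true := by
  simp [PySem.Chars.startswith, List.isPrefixOf]

theorem pv_sw_nil_src (c : Char) (p : List Char) : PySem.Chars.startswith [] (c::p) = false := by
  simp [PySem.Chars.startswith, List.isPrefixOf]

theorem pv_num_strip (rest : List Char) :
    ((PySem.List.pyRange 1 100 1).any (fun i =>
      PySem.Chars.startswith ('<'::'b'::'>'::rest) ('<' :: 'b' :: '>' :: (PySem.Int.toChars i ++ [')'])))) = pvNumAny rest := by
  simp only [pvNumAny, pv_sw_cons]

theorem pv_slice36 (xs : List Char) : PySem.List.slice xs (some 3) (some 6) = (xs.drop 3).take 3 := by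
  have h := PySem.List.slice_natCast xs 3 6
  norm_num at h
  exact h

theorem pv_key (t : String) (rest : List Char) (ht : t.toList = '<'::'b'::'>'::rest) :
    fits_speaker_pattern t = fits_speaker_pattern_alt t := by
  have h1 : "<b>".toList = ['<','b','>'] := by decide
  have h2 : "<b>–".toList = ['<','b','>','–'] := by decide
  have h3 : "<b>-".toList = ['<','b','>','-'] := by decide
  have ht3 : Int.toNat 3 = 3 := rfl
  have ht4 : Int.toNat 4 = 4 := rfl
  rcases rest with _ | ⟨a, _ | ⟨b, _ | ⟨c, rs⟩⟩⟩
  · simp only [fits_speaker_pattern, fits_speaker_pattern_alt, PySem.Str.startswith_eq,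
      PySem.Str.len_eq, PySem.Str.pyGet?, PySem.Str.slice, ht, h1, h2, h3, pv_num_strip,
      pv_numAny_nil]
    norm_num [pv_sw_cons, pv_sw_nil, pv_sw_single, pv_sw_nil_src, pv_slice36, ht3, ht4]
  · simp only [fits_speaker_pattern, fits_speaker_pattern_alt, PySem.Str.startswith_eq,
      PySem.Str.len_eq, PySem.Str.pyGet?, PySem.Str.slice, ht, h1, h2, h3, pv_num_strip,
      pv_numAny_one]
    norm_num [pv_sw_cons, pv_sw_nil, pv_sw_single, pv_sw_nil_src, pv_slice36, ht3, ht4]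
    simp only [pv_beq]
  · simp only [fits_speaker_pattern, fits_speaker_pattern_alt, PySem.Str.startswith_eq,
      PySem.Str.len_eq, PySem.Str.pyGet?, PySem.Str.slice, ht, h1, h2, h3, pv_num_strip,
      pv_numAny_cons]
    norm_num [pv_sw_cons, pv_sw_nil, pv_sw_single, pv_sw_nil_src, pv_slice36, ht3, ht4]
    all_goals simp only [pv_beq]
    all_goals
      (generalize (decide ('–' = a)) = x1
       generalize (decide ('-' = a)) = x2
       generalize (decide ('1' ≤ a)) = x3
       generalize (decide (a ≤ '9')) = x4
       generalize (decide (b = ')')) = x5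
       generalize (decide (a ∈ pvAsciiLetters)) = x9
       revert x1 x2 x3 x4 x5 x9
       decide)
  · have hg3 : PySem.List.pyGet? ('<'::'b'::'>'::a::b::c::rs) 3 = some a := by
      simp [PySem.List.pyGet?_of_nonneg]
    have hg4 : PySem.List.pyGet? ('<'::'b'::'>'::a::b::c::rs) 4 = some b := by
      simp [PySem.List.pyGet?_of_nonneg]
    have hlen : ((4:Int) ≤ (rs.length:Int) + 1 + 1 + 1 + 1 + 1) := by omega
    simp only [fits_speaker_pattern, fits_speaker_pattern_alt, PySem.Str.startswith_eq,
      PySem.Str.len_eq, PySem.Str.pyGet?, PySem.Str.slice, ht, h1, h2, h3, pv_num_strip,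
      pv_numAny_cons]
    norm_num [pv_sw_cons, pv_sw_nil, pv_sw_single, pv_sw_nil_src, pv_slice36, ht3, ht4,
      hg3, hg4, hlen]
    all_goals simp only [pv_beq]
    all_goals
      (generalize (decide ('–' = a)) = x1
       generalize (decide ('-' = a)) = x2
       generalize (decide ('1' ≤ a)) = x3
       generalize (decide (a ≤ '9')) = x4
       generalize (decide (b = ')')) = x5
       generalize (decide ('0' ≤ b)) = x6
       generalize (decide (b ≤ '9')) = x7
       generalize (decide (c = ')')) = x8
       generalize (decide (a ∈ pvAsciiLetters)) = x9
       revert x1 x2 x3 x4 x5 x6 x7 x8 x9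
       decide)

-- ===== VERDICT (by name: the statement is the Claim_ definition above) =====
set_option maxHeartbeats 1000000 in
theorem fits_speaker_pattern_spec : Claim_equal_fits_speaker_pattern := by
  intro t _
  unfold Spec_fits_speaker_pattern
  cases hb : PySem.Str.startswith t "<b>" with
  | false =>
    rw [fits_speaker_pattern, fits_speaker_pattern_alt]
    simp only [hb, Bool.not_false, if_true]
  | true =>
    have hb' := hb
    rw [PySem.Str.startswith_eq, PySem.Chars.startswith_iff] at hb'
    obtain ⟨rest, hrest⟩ := hb'
    have ht : t.toList = '<'::'b'::'>'::rest := by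
      rw [← hrest, show "<b>".toList = ['<','b','>'] from by decide]
      rfl
    rw [pv_key t rest ht]
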